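-- pv_equiv track=rewrite | github.com/bitscopic/BIAS-2015 | src/bias_2015/bias_variant_classification.py | get_weight_adjusted_scores
-- ===== SOURCE A (Python) =====
-- def get_weight_adjusted_scores(rationale_dict, b_or_p):
--     """
--     Each code has a weight that determines which class it should be applied too. This is somewhat confusing
--     as the code's names imply a strength.  It is possible to have a PVS (pathogenic very strong) with a strength
--     of supporting (1). Conversely, it is also possible to have a PP7 (pathogenic supporting #7)  code with
--     a strength of very strong (4).
--
--     Return the scores for each condition based on the weights applied to them
--     """
--     # These are lists as it was helpful for debugging. Technically we are only returning and using
--     # the number of elements in these lists, so these could be integers.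
--     stand_alone = []
--     very_strong = []
--     strong = []
--     moderate = []
--     supporting = []
--     for _, class_dict in rationale_dict.items():
--         for code, evidence in class_dict.items():
--             if code.startswith(b_or_p):
--                 code_score, _ = evidence # justification isn't needed
--                 if code_score >= 5: # Stand alone
--                     stand_alone.append(code)
--                 if code_score >= 4: # Very strong
--                     very_strong.append(code)
--                 elif code_score >= 3: # Strong
--                     strong.append(code)
--                 elif code_score >= 2: # Moderate
--                     moderate.append(code)
--                 elif code_score >= 1: # Supporting
--                     supporting.append(code)
--     return len(stand_alone), len(very_strong), len(strong), len(moderate), len(supporting)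
-- ===== SOURCE B (Python) =====
-- def get_weight_adjusted_scores(rationale_dict, b_or_p):
--     # Gather-then-count: one flat pass collects the matching scores,
--     # then each bucket is a separate counting pass over the scores list.
--     scores = []
--     for class_dict in rationale_dict.values():
--         for code, evidence in class_dict.items():
--             if code.startswith(b_or_p):
--                 s, _ = evidence
--                 scores.append(s)
--     stand_alone = sum(1 for s in scores if s >= 5)
--     very_strong = sum(1 for s in scores if s >= 4)
--     strong = sum(1 for s in scores if 3 <= s < 4)
--     moderate = sum(1 for s in scores if 2 <= s < 3)
--     supporting = sum(1 for s in scores if 1 <= s < 2)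
--     return stand_alone, very_strong, strong, moderate, supporting
-- ===== Notes on version B (the rewrite author's own statement) =====
-- stated objective: alternative
-- what changed: Replaces the single-pass five-list bucket assignment with a gather-then-count decomposition: one flat pass collects matching scores, then each of the five counts is an independent half-open/closed range count over that list.
import Mathlib
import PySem

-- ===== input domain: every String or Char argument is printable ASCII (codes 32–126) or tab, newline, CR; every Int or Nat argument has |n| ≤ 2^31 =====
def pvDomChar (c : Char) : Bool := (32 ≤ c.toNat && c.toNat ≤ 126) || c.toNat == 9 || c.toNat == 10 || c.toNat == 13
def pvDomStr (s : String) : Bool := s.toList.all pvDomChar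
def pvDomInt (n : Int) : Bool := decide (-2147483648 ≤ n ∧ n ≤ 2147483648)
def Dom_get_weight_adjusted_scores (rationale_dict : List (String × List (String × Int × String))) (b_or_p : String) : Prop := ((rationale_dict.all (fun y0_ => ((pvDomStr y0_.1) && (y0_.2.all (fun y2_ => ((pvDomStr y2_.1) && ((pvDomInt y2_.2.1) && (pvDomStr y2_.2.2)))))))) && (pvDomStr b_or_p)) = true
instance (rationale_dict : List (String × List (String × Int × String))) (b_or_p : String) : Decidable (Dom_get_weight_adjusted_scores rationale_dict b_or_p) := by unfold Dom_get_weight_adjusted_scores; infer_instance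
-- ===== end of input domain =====

-- B replaces A's single-pass five-bucket assignment with a gather-then-count decomposition
-- (collect matching scores, then five independent range counts); objective: alternative.

-- ===== PORT A =====
-- one loop step of A's inner loop: appends the code to the buckets A appends to
def pvAStep (b_or_p : String)
    (st : List String × List String × List String × List String × List String)
    (e : String × Int × String) :
    List String × List String × List String × List String × List String :=
  match st with
  | (sa, vs, stg, mo, su) =>
    if PySem.Str.startswith e.1 b_or_p then
      let code_score := e.2.1
      let sa' := if code_score ≥ 5 then sa ++ [e.1] else sa
      if code_score ≥ 4 then (sa', vs ++ [e.1], stg, mo, su)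
      else if code_score ≥ 3 then (sa', vs, stg ++ [e.1], mo, su)
      else if code_score ≥ 2 then (sa', vs, stg, mo ++ [e.1], su)
      else if code_score ≥ 1 then (sa', vs, stg, mo, su ++ [e.1])
      else (sa', vs, stg, mo, su)
    else st

def get_weight_adjusted_scores (rationale_dict : List (String × List (String × Int × String))) (b_or_p : String) : Int × Int × Int × Int × Int :=
  let fin := rationale_dict.foldl (fun st kv => kv.2.foldl (pvAStep b_or_p) st) ([], [], [], [], [])
  ((fin.1.length : Int), (fin.2.1.length : Int), (fin.2.2.1.length : Int),
   (fin.2.2.2.1.length : Int), (fin.2.2.2.2.length : Int))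

-- ===== PORT B =====
-- one step of B's flat gathering pass: keep the score when the code matches the prefix
def pvBStep (b_or_p : String) (l : List Int) (e : String × Int × String) : List Int :=
  if PySem.Str.startswith e.1 b_or_p then l ++ [e.2.1] else l

def get_weight_adjusted_scores_alt (rationale_dict : List (String × List (String × Int × String))) (b_or_p : String) : Int × Int × Int × Int × Int :=
  let scores := rationale_dict.foldl (fun l kv => kv.2.foldl (pvBStep b_or_p) l) []
  ((scores.countP (fun s => decide (5 ≤ s)) : Int),
   (scores.countP (fun s => decide (4 ≤ s)) : Int),
   (scores.countP (fun s => decide (3 ≤ s ∧ s < 4)) : Int),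
   (scores.countP (fun s => decide (2 ≤ s ∧ s < 3)) : Int),
   (scores.countP (fun s => decide (1 ≤ s ∧ s < 2)) : Int))

-- ===== PRECONDITION & SPEC =====
def Spec_get_weight_adjusted_scores (rationale_dict : List (String × List (String × Int × String))) (b_or_p : String) (out : Int × Int × Int × Int × Int) : Prop := out = get_weight_adjusted_scores_alt rationale_dict b_or_p
instance (rationale_dict : List (String × List (String × Int × String))) (b_or_p : String) (out : Int × Int × Int × Int × Int) : Decidable (Spec_get_weight_adjusted_scores rationale_dict b_or_p out) := by unfold Spec_get_weight_adjusted_scores; infer_instance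

-- ===== CLAIM (what is proved, stated in full; the proofs are below) =====
def Claim_equal_get_weight_adjusted_scores : Prop := ∀ (rationale_dict : List (String × List (String × Int × String))) (b_or_p : String), Dom_get_weight_adjusted_scores rationale_dict b_or_p → Spec_get_weight_adjusted_scores rationale_dict b_or_p (get_weight_adjusted_scores rationale_dict b_or_p)

-- ===== LEMMAS AND PROOFS =====

-- the five bucket lengths of an A-state, as A's result tuple
def pvLen (st : List String × List String × List String × List String × List String) : Int × Int × Int × Int × Int :=
  ((st.1.length : Int), (st.2.1.length : Int), (st.2.2.1.length : Int),
   (st.2.2.2.1.length : Int), (st.2.2.2.2.length : Int))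

-- the five range counts over a B-scores list, as B's result tuple
def pvCnt (sc : List Int) : Int × Int × Int × Int × Int :=
  ((sc.countP (fun s => decide (5 ≤ s)) : Int),
   (sc.countP (fun s => decide (4 ≤ s)) : Int),
   (sc.countP (fun s => decide (3 ≤ s ∧ s < 4)) : Int),
   (sc.countP (fun s => decide (2 ≤ s ∧ s < 3)) : Int),
   (sc.countP (fun s => decide (1 ≤ s ∧ s < 2)) : Int))

lemma pvStepInv (b : String) (e : String × Int × String)
    (st : List String × List String × List String × List String × List String)
    (sc : List Int) (h : pvLen st = pvCnt sc) :
    pvLen (pvAStep b st e) = pvCnt (pvBStep b sc e) := by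
  obtain ⟨sa, vs, stg, mo, su⟩ := st
  simp only [pvLen, pvCnt, Prod.mk.injEq] at h
  obtain ⟨h1, h2, h3, h4, h5⟩ := h
  unfold pvAStep pvBStep
  dsimp only
  split_ifs <;>
    simp only [pvLen, pvCnt, Prod.mk.injEq, List.countP_append, List.countP_cons,
      List.countP_nil, List.length_append, List.length_cons, List.length_nil,
      decide_eq_true_eq] <;>
    refine ⟨?_, ?_, ?_, ?_, ?_⟩ <;> (try split_ifs) <;> omega

lemma pvFoldInnerInv (b : String) (cd : List (String × Int × String))
    (st : List String × List String × List String × List String × List String)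
    (sc : List Int) (h : pvLen st = pvCnt sc) :
    pvLen (cd.foldl (pvAStep b) st) = pvCnt (cd.foldl (pvBStep b) sc) := by
  induction cd generalizing st sc with
  | nil => exact h
  | cons e tl ih => exact ih _ _ (pvStepInv b e st sc h)

lemma pvFoldOuterInv (b : String) (rd : List (String × List (String × Int × String)))
    (st : List String × List String × List String × List String × List String)
    (sc : List Int) (h : pvLen st = pvCnt sc) :
    pvLen (rd.foldl (fun st kv => kv.2.foldl (pvAStep b) st) st)
      = pvCnt (rd.foldl (fun l kv => kv.2.foldl (pvBStep b) l) sc) := by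
  induction rd generalizing st sc with
  | nil => exact h
  | cons kv tl ih => exact ih _ _ (pvFoldInnerInv b kv.2 st sc h)

-- ===== VERDICT (by name: the statement is the Claim_ definition above) =====
theorem get_weight_adjusted_scores_spec : Claim_equal_get_weight_adjusted_scores := by
  intro rd b _
  show _ = _
  have h := pvFoldOuterInv b rd ([], [], [], [], []) [] rfl
  simpa [get_weight_adjusted_scores, get_weight_adjusted_scores_alt, pvLen, pvCnt] using h
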